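-- pv_equiv track=rewrite | github.com/Anneroos/AdventOfCode | 2019/Day4.py | checkNumber2
-- ===== SOURCE A (Python) =====
-- def checkNumber2(array):
--     adjacency = False
--     monotone = True
--     adjacencyDict = {}
--     for i in range(1,len(array)):
--         if array[i] == array[i-1]:
--
--             adjacencyDict[array[i]] = 1
--         if array[i] < array[i-1]:
--             monotone = False
--     for i in range(2,len(array)):
--         if array[i] == array[i-1] and array[i] == array[i-2]:
--             adjacencyDict[array[i]] = 0
--     for value in adjacencyDict.values():
--         if value == 1:
--             adjacency = True
--     return  (adjacency and monotone)
-- ===== SOURCE B (Python) =====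
-- def checkNumber2(array):
--     # monotone: every adjacent pair is non-decreasing
--     monotone = all(a <= b for a, b in zip(array, array[1:]))
--     # single run-length pass: does any maximal run of equal elements have length exactly 2?
--     has_exact_pair = False
--     run = 0
--     prev = None
--     for x in array:
--         if run > 0 and x == prev:
--             run += 1
--         else:
--             if run == 2:
--                 has_exact_pair = True
--             run = 1
--             prev = x
--     if run == 2:
--         has_exact_pair = True
--     return monotone and has_exact_pair
-- ===== Notes on version B (the rewrite author's own statement) =====
-- stated objective: simpler
-- what changed: Replaced A's three passes (adjacency dict build over pairs, triple-erasing dict pass, dict-values scan) by one run-length pass that flags a maximal run of length exactly 2, plus a single zip-based monotone check; correct because the final 'and' masks non-monotone inputs, and on monotone inputs equal values are consecutive so A's value-keyed dict coincides with run structure.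
import Mathlib
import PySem

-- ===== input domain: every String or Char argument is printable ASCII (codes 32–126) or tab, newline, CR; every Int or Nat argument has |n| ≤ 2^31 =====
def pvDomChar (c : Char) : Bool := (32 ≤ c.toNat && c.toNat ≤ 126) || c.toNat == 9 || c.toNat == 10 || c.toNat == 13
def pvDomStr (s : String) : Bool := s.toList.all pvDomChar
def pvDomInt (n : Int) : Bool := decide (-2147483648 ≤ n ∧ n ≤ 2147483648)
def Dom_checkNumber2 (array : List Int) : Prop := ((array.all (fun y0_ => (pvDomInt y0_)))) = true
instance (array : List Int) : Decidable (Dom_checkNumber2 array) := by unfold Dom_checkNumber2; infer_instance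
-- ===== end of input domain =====

-- B replaces A's three dict passes by one run-length pass plus a zip-based monotone check (objective: simpler).

-- ===== PORT A =====
-- Literal transliteration of A: first loop updates the dict (adjacencyDict[array[i]] = 1) and the
-- monotone flag (two independent assignments, rendered as the two components of the pair state),
-- second loop overwrites triple-valued keys with 0, last loop scans the dict's values.
-- Indices i, i-1, i-2 always lie in range for i ∈ range(1,len)/range(2,len), so pyGetD with
-- default 0 is exact.
def checkNumber2 (array : List Int) : Bool :=
  let n : Int := PySem.List.len array
  let st := (PySem.List.pyRange 1 n 1).foldl
    (fun (st : PySem.Dict Int Int × Bool) i =>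
      (if PySem.List.pyGetD array i 0 == PySem.List.pyGetD array (i-1) 0
         then st.1.insert (PySem.List.pyGetD array i 0) 1 else st.1,
       if PySem.List.pyGetD array i 0 < PySem.List.pyGetD array (i-1) 0 then false else st.2))
    (PySem.Dict.empty, true)
  let d2 := (PySem.List.pyRange 2 n 1).foldl
    (fun (d : PySem.Dict Int Int) i =>
      if PySem.List.pyGetD array i 0 == PySem.List.pyGetD array (i-1) 0
         && PySem.List.pyGetD array i 0 == PySem.List.pyGetD array (i-2) 0
      then d.insert (PySem.List.pyGetD array i 0) 0 else d) st.1
  let adjacency := d2.values.foldl (fun b v => if v == 1 then true else b) false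
  adjacency && st.2

-- ===== PORT B =====
-- Literal transliteration of Source B: zip(array, array[1:]) is array.zip (array.drop 1); the run
-- state is (has_exact_pair, run, prev); Python's 'prev = None' start is modelled by prev = 0,
-- unread because it is guarded by run > 0.
def checkNumber2_alt (array : List Int) : Bool :=
  let monotone := (array.zip (array.drop 1)).all (fun p => decide (p.1 ≤ p.2))
  let st := array.foldl
    (fun (s : Bool × Int × Int) x =>
      if 0 < s.2.1 && x == s.2.2 then (s.1, s.2.1 + 1, s.2.2)
      else ((s.1 || s.2.1 == 2), 1, x))
    (false, 0, 0)
  monotone && (st.1 || st.2.1 == 2)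

-- ===== PRECONDITION & SPEC =====
def Spec_checkNumber2 (array : List Int) (out : Bool) : Prop := out = checkNumber2_alt array
instance (array : List Int) (out : Bool) : Decidable (Spec_checkNumber2 array out) := by unfold Spec_checkNumber2; infer_instance

-- ===== CLAIM (what is proved, stated in full; the proofs are below) =====
def Claim_equal_checkNumber2 : Prop := ∀ (array : List Int), Dom_checkNumber2 array → Spec_checkNumber2 array (checkNumber2 array)

-- ===== LEMMAS AND PROOFS =====

def adjPairs {β : Type} (l : List β) : List (β × β) := l.zip l.tail
def pairAny (l : List Int) (v : Int) : Bool :=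
  (adjPairs l).any (fun p => p.2 == p.1 && p.2 == v)
def tripAny (l : List Int) (v : Int) : Bool :=
  (adjPairs (adjPairs l)).any (fun t => (t.2.2 == t.2.1 && t.2.2 == t.1.1) && t.2.2 == v)
def monoBool (l : List Int) : Bool := !(adjPairs l).any (fun p => decide (p.2 < p.1))
def dA (l : List Int) : PySem.Dict Int Int :=
  (adjPairs (adjPairs l)).foldl
    (fun d t => if (t.2.2 == t.2.1 && t.2.2 == t.1.1) then d.insert t.2.2 0 else d)
    ((adjPairs l).foldl (fun d p => if p.2 == p.1 then d.insert p.2 1 else d) PySem.Dict.empty)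
def adjBool (l : List Int) : Bool := (dA l).values.any (· == 1)
def bstep (s : Bool × Int × Int) (x : Int) : Bool × Int × Int :=
  if 0 < s.2.1 && x == s.2.2 then (s.1, s.2.1 + 1, s.2.2) else ((s.1 || s.2.1 == 2), 1, x)
def bres (l : List Int) : Bool :=
  let t := l.foldl bstep (false, 0, 0); t.1 || (t.2.1 == 2)

theorem foldl_range_getD {α β : Type} (f : α → β → α) (d : β) :
    ∀ (M : List β) (init : α),
      (List.range M.length).foldl (fun acc k => f acc (M.getD k d)) init = M.foldl f init := by
  intro M
  induction M with
  | nil => intro init; simp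
  | cons b T ih =>
    intro init
    rw [List.length_cons, List.range_succ_eq_map, List.foldl_cons, List.foldl_map]
    simp only [List.getD_cons_zero, List.getD_cons_succ]
    exact ih (f init b)

theorem foldl_pyRange_eq {α β : Type} (s n : Int) (M : List β) (d : β)
    (f : α → β → α) (g : α → Int → α) (init : α)
    (hlen : (n - s).toNat = M.length)
    (h : ∀ (k : Nat), k < M.length → ∀ acc, g acc (s + k) = f acc (M.getD k d)) :
    (PySem.List.pyRange s n 1).foldl g init = M.foldl f init := by
  rw [PySem.List.pyRange_one, List.foldl_map, hlen, ← foldl_range_getD f d M init]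
  refine PySem.List.foldl_congr_mem _ _ _ _ ?_
  intro acc k hk
  exact h k (List.mem_range.mp hk) acc

theorem adjPairs_length {β : Type} (l : List β) : (adjPairs l).length = l.length - 1 := by
  simp [adjPairs, List.length_zip, List.length_tail]

theorem adjPairs_getD {β : Type} (l : List β) (d : β) (k : Nat) (hk : k < (adjPairs l).length) :
    (adjPairs l).getD k (d, d) = (l.getD k d, l.getD (k+1) d) := by
  have hl : k + 1 < l.length := by
    have := adjPairs_length l; omega
  rw [List.getD_eq_getElem _ _ hk, List.getD_eq_getElem _ _ (by omega),
      List.getD_eq_getElem _ _ hl]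
  simp [adjPairs, List.getElem_zip, List.getElem_tail]

-- pointwise lookups for the transfer: i = 1 + k
theorem lookup1 (a : List Int) (k : Nat) (hk : k < (adjPairs a).length) :
    PySem.List.pyGetD a ((1:Int) + k) 0 = ((adjPairs a).getD k (0,0)).2
    ∧ PySem.List.pyGetD a ((1:Int) + k - 1) 0 = ((adjPairs a).getD k (0,0)).1 := by
  rw [adjPairs_getD a 0 k hk]
  constructor
  · have : (1:Int) + k = ((k+1 : Nat) : Int) := by omega
    rw [this, PySem.List.pyGetD_natCast]
  · have : (1:Int) + k - 1 = ((k : Nat) : Int) := by omega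
    rw [this, PySem.List.pyGetD_natCast]

theorem lookup2 (a : List Int) (k : Nat) (hk : k < (adjPairs (adjPairs a)).length) :
    ((adjPairs (adjPairs a)).getD k ((0,0),(0,0)))
      = ((a.getD k 0, a.getD (k+1) 0), (a.getD (k+1) 0, a.getD (k+2) 0)) := by
  have hk1 : k + 1 < (adjPairs a).length := by
    have := adjPairs_length (adjPairs a); omega
  rw [adjPairs_getD (adjPairs a) (0,0) k hk,
      adjPairs_getD a 0 k (by omega), adjPairs_getD a 0 (k+1) hk1]

theorem A_char (a : List Int) : checkNumber2 a = (adjBool a && monoBool a) := by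
  simp only [checkNumber2]
  rw [PySem.List.foldl_prod_mk
      (f := fun (d : PySem.Dict Int Int) (i : Int) =>
        if PySem.List.pyGetD a i 0 == PySem.List.pyGetD a (i-1) 0
          then d.insert (PySem.List.pyGetD a i 0) 1 else d)
      (g := fun (m : Bool) (i : Int) =>
        if PySem.List.pyGetD a i 0 < PySem.List.pyGetD a (i-1) 0 then false else m)]
  have hlen1 : ((PySem.List.len a) - 1).toNat = (adjPairs a).length := by
    rw [adjPairs_length]; simp [PySem.List.len_eq]
  have hlen2 : ((PySem.List.len a) - 2).toNat = (adjPairs (adjPairs a)).length := by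
    rw [adjPairs_length, adjPairs_length]; simp [PySem.List.len_eq]; omega
  rw [foldl_pyRange_eq 1 (PySem.List.len a) (adjPairs a) (0,0)
      (fun d p => if p.2 == p.1 then d.insert p.2 1 else d) _ PySem.Dict.empty hlen1
      (by intro k hk acc
          obtain ⟨h1, h2⟩ := lookup1 a k hk
          simp only [h1, h2])]
  rw [foldl_pyRange_eq 1 (PySem.List.len a) (adjPairs a) (0,0)
      (fun m p => if p.2 < p.1 then false else m) _ true hlen1
      (by intro k hk acc
          obtain ⟨h1, h2⟩ := lookup1 a k hk
          simp only [h1, h2])]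
  rw [foldl_pyRange_eq 2 (PySem.List.len a) (adjPairs (adjPairs a)) ((0,0),(0,0))
      (fun d t => if (t.2.2 == t.2.1 && t.2.2 == t.1.1) then d.insert t.2.2 0 else d) _ _ hlen2
      (by intro k hk acc
          have h2 := lookup2 a k hk
          have e0 : (2:Int) + k = ((k+2 : Nat) : Int) := by omega
          have e1 : ((k+2 : Nat) : Int) - 1 = ((k+1 : Nat) : Int) := by omega
          have e2 : ((k+2 : Nat) : Int) - 2 = ((k : Nat) : Int) := by omega
          simp only [h2, e0, e1, e2, PySem.List.pyGetD_natCast])]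
  rw [PySem.List.foldl_if_true_eq]
  simp only [Bool.false_or]
  have hmono : (List.foldl (fun m p => if p.2 < p.1 then false else m) true (adjPairs a))
      = monoBool a := by
    have hb : (fun (m : Bool) (p : Int × Int) => if p.2 < p.1 then false else m)
        = (fun m p => if decide (p.2 < p.1) then false else m) := by
      funext m p; by_cases h : p.2 < p.1 <;> simp [h]
    rw [hb, PySem.List.foldl_if_false_eq (p := fun p : Int × Int => decide (p.2 < p.1))]
    simp [monoBool]
  have hdrop : a.drop 1 = a.tail := List.drop_one
  rw [hmono]
  rfl

theorem get?_foldl_condInsert {β : Type} (c : β → Bool) (key : β → Int) (w : Int) :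
    ∀ (l : List β) (d : PySem.Dict Int Int) (v : Int),
      (l.foldl (fun d t => if c t then d.insert (key t) w else d) d).get? v
        = if l.any (fun t => c t && (key t == v)) then some w else d.get? v := by
  intro l
  induction l with
  | nil => intro d v; simp
  | cons b T ih =>
    intro d v
    rw [List.foldl_cons, List.any_cons, ih]
    by_cases hc : c b = true
    · simp only [hc, if_true, Bool.true_and]
      by_cases hv : key b = v
      · subst hv
        simp only [BEq.rfl, Bool.true_or, if_true]
        split_ifs with h1
        · rfl
        · exact PySem.Dict.get?_insert_self _ _ _
      · have hbv : (key b == v) = false := by simp [hv]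
        rw [hbv, Bool.false_or, PySem.Dict.get?_insert_of_ne _ _ (Ne.symm hv)]
    · have hc' : c b = false := by simpa using hc
      simp [hc']

theorem nodup_foldl_condInsert {β : Type} (c : β → Bool) (key : β → Int) (w : Int) :
    ∀ (l : List β) (d : PySem.Dict Int Int), d.keys.Nodup →
      (l.foldl (fun d t => if c t then d.insert (key t) w else d) d).keys.Nodup := by
  intro l
  induction l with
  | nil => intro d h; simpa
  | cons b T ih =>
    intro d h
    rw [List.foldl_cons]
    by_cases hc : c b = true
    · rw [if_pos hc]
      exact ih _ (PySem.Dict.nodup_keys_insert _ _ _ h)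
    · rw [if_neg hc]
      exact ih _ h

theorem values_any_iff (d : PySem.Dict Int Int) (w : Int) (hnd : d.keys.Nodup) :
    d.values.any (· == w) = true ↔ ∃ k, d.get? k = some w := by
  have hval : d.values = d.items.map Prod.snd := rfl
  constructor
  · intro h
    obtain ⟨v, hv, he⟩ := List.any_eq_true.mp h
    rw [hval] at hv
    obtain ⟨⟨k, v'⟩, hp, hpe⟩ := List.mem_map.mp hv
    have hvw : v = w := by simpa using he
    subst hvw
    cases hpe
    exact ⟨k, PySem.Dict.get?_of_mem_items _ hp hnd⟩
  · intro ⟨k, hk⟩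
    have hitem := PySem.Dict.mem_items_of_get?_eq_some _ hk
    refine List.any_eq_true.mpr ⟨w, ?_, by simp⟩
    rw [hval]
    exact List.mem_map.mpr ⟨(k, w), hitem, rfl⟩

theorem dA_get? (l : List Int) (v : Int) :
    (dA l).get? v = if tripAny l v then some 0 else if pairAny l v then some 1 else none := by
  unfold dA
  rw [get?_foldl_condInsert (fun t : (Int × Int) × (Int × Int) => t.2.2 == t.2.1 && t.2.2 == t.1.1) (fun t => t.2.2) 0,
      get?_foldl_condInsert (fun p : Int × Int => p.2 == p.1) (fun p => p.2) 1]
  rw [PySem.Dict.get?_empty]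
  rfl

theorem dA_nodup (l : List Int) : (dA l).keys.Nodup := by
  unfold dA
  apply nodup_foldl_condInsert
  apply nodup_foldl_condInsert
  simp [PySem.Dict.keys_empty]

theorem adj_iff (l : List Int) :
    adjBool l = true ↔ ∃ v, pairAny l v = true ∧ tripAny l v = false := by
  unfold adjBool
  rw [values_any_iff _ _ (dA_nodup l)]
  constructor
  · intro ⟨k, hk⟩
    rw [dA_get? l k] at hk
    refine ⟨k, ?_, ?_⟩ <;> by_cases h1 : tripAny l k = true <;>
      by_cases h2 : pairAny l k = true <;> simp_all
  · intro ⟨v, h1, h2⟩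
    exact ⟨v, by rw [dA_get? l v, h1, h2]; simp⟩

theorem chain_iff_pairs (l : List Int) :
    (∀ p ∈ adjPairs l, p.1 ≤ p.2) ↔ l.IsChain (· ≤ ·) := by
  induction l with
  | nil => simp [adjPairs]
  | cons x t ih =>
    cases t with
    | nil => simp [adjPairs]
    | cons y s =>
      have h : adjPairs (x :: y :: s) = (x, y) :: adjPairs (y :: s) := rfl
      rw [h, List.isChain_cons_cons, ← ih]
      simp_all

theorem mono_iff (l : List Int) : monoBool l = true ↔ l.Pairwise (· ≤ ·) := by
  unfold monoBool
  rw [← List.isChain_iff_pairwise, ← chain_iff_pairs]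
  simp [not_lt]

theorem B_char (a : List Int) : checkNumber2_alt a = (monoBool a && bres a) := by
  simp only [checkNumber2_alt]
  have h1 : (a.zip (a.drop 1)).all (fun p => decide (p.1 ≤ p.2)) = monoBool a := by
    rw [List.drop_one]
    unfold monoBool
    have hb : (fun p : Int × Int => decide (p.2 < p.1))
        = (fun p : Int × Int => !decide (p.1 ≤ p.2)) := by
      funext p
      by_cases h : p.2 < p.1
      · simp [h, show ¬(p.1 ≤ p.2) by omega]
      · simp [h, show p.1 ≤ p.2 by omega]
    rw [hb, ← List.all_eq_not_any_not]
    rfl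
  rw [h1]
  rfl

theorem adjPairs_cons_cons {β : Type} (x y : β) (t : List β) :
    adjPairs (x :: y :: t) = (x, y) :: adjPairs (y :: t) := rfl

theorem pairAny_mem (l : List Int) (v : Int) (h : pairAny l v = true) : v ∈ l := by
  obtain ⟨p, hp, he⟩ := List.any_eq_true.mp h
  have h2 : p.2 = v := by
    have := (Bool.and_eq_true_iff.mp he).2; simpa using this
  have := (List.of_mem_zip (by exact hp : (p.1, p.2) ∈ l.zip l.tail)).2
  rw [h2] at this
  exact List.mem_of_mem_tail this

theorem tripAny_mem (l : List Int) (v : Int) (h : tripAny l v = true) : v ∈ l := by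
  obtain ⟨t, ht, he⟩ := List.any_eq_true.mp h
  have h2 : t.2.2 = v := by
    have := (Bool.and_eq_true_iff.mp he).2; simpa using this
  have hm : t.2 ∈ adjPairs l := by
    have := (List.of_mem_zip (by exact ht : (t.1, t.2) ∈ (adjPairs l).zip (adjPairs l).tail)).2
    exact List.mem_of_mem_tail this
  have := (List.of_mem_zip (by exact hm : (t.2.1, t.2.2) ∈ l.zip l.tail)).2
  rw [h2] at this
  exact List.mem_of_mem_tail this

theorem pairAny_block (x v : Int) (m : Nat) (rest : List Int)
    (hhead : ∀ y ∈ rest.head?, y ≠ x) :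
    pairAny (List.replicate (m+1) x ++ rest) v
      = ((decide (1 ≤ m) && (x == v)) || pairAny rest v) := by
  induction m with
  | zero =>
    rw [show List.replicate (0+1) x = [x] from rfl, List.singleton_append]
    cases rest with
    | nil => rfl
    | cons y t =>
      have hyx : (y == x) = false := by simp [hhead y rfl]
      rw [show pairAny (x :: y :: t) v
            = ((y == x && y == v) || pairAny (y :: t) v) from by
          simp [pairAny, adjPairs_cons_cons]]
      rw [hyx, Bool.false_and, Bool.false_or]
      simp
  | succ m ih =>
    have hsplit : List.replicate (m+1+1) x ++ rest
        = x :: (List.replicate (m+1) x ++ rest) := by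
      rw [List.replicate_succ]; rfl
    have hsplit2 : List.replicate (m+1) x ++ rest
        = x :: (List.replicate m x ++ rest) := by
      rw [List.replicate_succ]; rfl
    rw [hsplit]
    rw [show pairAny (x :: (List.replicate (m+1) x ++ rest)) v
          = ((x == x && x == v) || pairAny (List.replicate (m+1) x ++ rest) v) from by
        rw [hsplit2]; simp [pairAny, adjPairs_cons_cons]]
    rw [ih]
    by_cases hxv : x = v
    · simp [hxv]
    · have hb : (x == v) = false := by simp [hxv]
      simp [hb]

theorem tripAny_block (x v : Int) (m : Nat) (rest : List Int)
    (hhead : ∀ y ∈ rest.head?, y ≠ x) (hx : x ∉ rest) :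
    tripAny (List.replicate (m+1) x ++ rest) v
      = ((decide (2 ≤ m) && (x == v)) || tripAny rest v) := by
  induction m with
  | zero =>
    rw [show List.replicate (0+1) x = [x] from rfl, List.singleton_append]
    cases rest with
    | nil => rfl
    | cons y t =>
      cases t with
      | nil => rfl
      | cons z s =>
        have hz : (z == x) = false := by
          simp; intro h; exact hx (by simp [h])
        rw [show tripAny (x :: y :: z :: s) v
              = (((z == y && z == x) && z == v) || tripAny (y :: z :: s) v) from by
            simp [tripAny, adjPairs_cons_cons]]
        rw [show ((z == y && z == x) && z == v) = false from by rw [hz]; simp,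
            Bool.false_or]
        simp
  | succ m ih =>
    have hsplit : List.replicate (m+1+1) x ++ rest
        = x :: (List.replicate (m+1) x ++ rest) := by
      rw [List.replicate_succ]; rfl
    have hsplit2 : List.replicate (m+1) x ++ rest
        = x :: (List.replicate m x ++ rest) := by
      rw [List.replicate_succ]; rfl
    cases m with
    | zero =>
      -- block is [x, x]
      cases rest with
      | nil => rfl
      | cons y t =>
        have hyx : (y == x) = false := by simp [hhead y rfl]
        have hd : adjPairs (adjPairs (x :: x :: y :: t))
            = ((x,x),(x,y)) :: adjPairs (adjPairs (x :: y :: t)) := by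
          rw [adjPairs_cons_cons x x (y :: t), adjPairs_cons_cons x y t,
              adjPairs_cons_cons (x,x) (x,y) (adjPairs (y :: t))]
        rw [show List.replicate (0+1+1) x ++ y :: t = x :: x :: y :: t from rfl]
        rw [show tripAny (x :: x :: y :: t) v
              = (((y == x && y == x) && y == v) || tripAny (x :: y :: t) v) from by
            simp [tripAny, hd]]
        have hbase := ih
        rw [show List.replicate (0+1) x ++ y :: t = x :: y :: t from rfl] at hbase
        rw [hbase, hyx]
        simp
    | succ m' =>
      -- block has ≥ 3 copies of x
      have hd : adjPairs (adjPairs (x :: x :: (List.replicate (m'+1) x ++ rest)))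
          = ((x,x),(x,x)) :: adjPairs (adjPairs (x :: (List.replicate (m'+1) x ++ rest))) := by
        have h2 : List.replicate (m'+1) x ++ rest = x :: (List.replicate m' x ++ rest) := by
          rw [List.replicate_succ]; rfl
        rw [h2]
        rw [adjPairs_cons_cons x x (x :: (List.replicate m' x ++ rest)),
            adjPairs_cons_cons x x (List.replicate m' x ++ rest)]
        rcases hne : List.replicate m' x ++ rest with _ | ⟨c, w⟩
        · rfl
        · rw [adjPairs_cons_cons x c w,
              adjPairs_cons_cons (x,x) (x,x) ((x,c) :: adjPairs (c :: w)),
              adjPairs_cons_cons (x,x) (x,c) (adjPairs (c :: w))]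
      rw [hsplit, hsplit2]
      rw [show tripAny (x :: x :: (List.replicate (m'+1) x ++ rest)) v
            = (((x == x && x == x) && x == v)
               || tripAny (x :: (List.replicate (m'+1) x ++ rest)) v) from by
          simp [tripAny, hd]]
      rw [← hsplit2, ih]
      by_cases hxv : x = v
      · simp [hxv, show (2:Nat) ≤ m'+1+1 by omega]
      · have hb : (x == v) = false := by simp [hxv]
        simp [hb]

theorem bstep_run (x : Int) (m : Nat) :
    ∀ (h : Bool) (r : Int), 0 < r →
      (List.replicate m x).foldl bstep (h, r, x) = (h, r + m, x) := by
  induction m with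
  | zero => intro h r _; simp
  | succ m ih =>
    intro h r hr
    rw [List.replicate_succ, List.foldl_cons]
    rw [show bstep (h, r, x) x = (h, r + 1, x) from by
      simp [bstep, hr]]
    rw [ih h (r+1) (by omega)]
    have : r + 1 + (m : Int) = r + ((m+1 : Nat) : Int) := by omega
    rw [this]

theorem bstep_or :
    ∀ (l : List Int) (h : Bool) (r p : Int),
      (l.foldl bstep (h, r, p)).1 = (h || (l.foldl bstep (false, r, p)).1)
      ∧ (l.foldl bstep (h, r, p)).2 = (l.foldl bstep (false, r, p)).2 := by
  intro l
  induction l with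
  | nil => intro h r p; simp
  | cons x T ih =>
    intro h r p
    rw [List.foldl_cons, List.foldl_cons]
    by_cases hc : (0 < r && x == p) = true
    · rw [show bstep (h, r, p) x = (h, r + 1, p) from by simp [bstep, hc],
          show bstep (false, r, p) x = (false, r + 1, p) from by simp [bstep, hc]]
      exact ih h (r+1) p
    · have hc' : (0 < r && x == p) = false := by simpa using hc
      rw [show bstep (h, r, p) x = (h || (r == 2), 1, x) from by simp [bstep, hc'],
          show bstep (false, r, p) x = ((r == 2), 1, x) from by simp [bstep, hc']]
      obtain ⟨h1, h2⟩ := ih (h || (r == 2)) 1 x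
      obtain ⟨h1', h2'⟩ := ih (r == 2) 1 x
      constructor
      · rw [h1, h1']
        cases h <;> cases (r == 2) <;> cases (T.foldl bstep (false, 1, x)).1 <;> rfl
      · rw [h2, h2']

theorem bres_block (x : Int) (m : Nat) (rest : List Int)
    (hhead : ∀ y ∈ rest.head?, y ≠ x) :
    bres (List.replicate (m+1) x ++ rest) = (((m:Int) + 1 == 2) || bres rest) := by
  simp only [bres]
  rw [List.foldl_append, List.replicate_succ, List.foldl_cons]
  rw [show bstep (false, 0, 0) x = (false, 1, x) from by simp [bstep]]
  rw [bstep_run x m false 1 (by omega)]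
  cases rest with
  | nil =>
    simp only [List.foldl_nil]
    have : (1 + (m:Int)) = ((m:Int) + 1) := by omega
    rw [this]
    simp
  | cons y t =>
    have hyx : (y == x) = false := by simp [hhead y rfl]
    rw [List.foldl_cons,
        show bstep (false, 1 + (m:Int), x) y = ((1 + (m:Int) == 2), 1, y) from by
          simp [bstep, hyx],
        List.foldl_cons,
        show bstep (false, 0, 0) y = (false, 1, y) from by simp [bstep]]
    obtain ⟨h1, h2⟩ := bstep_or t (1 + (m:Int) == 2) 1 y
    rw [h1, h2]
    have : ((1 + (m:Int)) == 2) = (((m:Int) + 1) == 2) := by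
      have : (1 + (m:Int)) = ((m:Int) + 1) := by omega
      rw [this]
    rw [this]
    cases hb : (((m:Int) + 1) == 2) <;>
      cases hb2 : (t.foldl bstep (false, 1, y)).1 <;> simp

theorem run_ind (P : List Int → Prop) (h0 : P [])
    (hstep : ∀ (x : Int) (m : Nat) (rest : List Int),
      (∀ y ∈ rest.head?, y ≠ x) → P rest → P (List.replicate (m+1) x ++ rest)) :
    ∀ l, P l := by
  have key : ∀ (n : Nat) (l : List Int), l.length ≤ n → P l := by
    intro n
    induction n with
    | zero =>
      intro l hl
      have hnil : l = [] := List.length_eq_zero_iff.mp (Nat.le_zero.mp hl)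
      rw [hnil]
      exact h0
    | succ n ih =>
      intro l hl
      cases l with
      | nil => exact h0
      | cons x xs =>
        have hxs : xs = xs.takeWhile (fun y => y == x) ++ xs.dropWhile (fun y => y == x) :=
          (List.takeWhile_append_dropWhile).symm
        have ht : xs.takeWhile (fun y => y == x)
            = List.replicate (xs.takeWhile (fun y => y == x)).length x := by
          rw [List.eq_replicate_iff]
          refine ⟨rfl, ?_⟩
          intro b hb
          have := List.mem_takeWhile_imp hb
          simpa using this
        have hhead : ∀ y ∈ (xs.dropWhile (fun y => y == x)).head?, y ≠ x := by
          intro y hy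
          have := List.head?_dropWhile_not (p := fun y => y == x) (l := xs)
          rw [hy] at this
          simpa using this
        have hr : (xs.dropWhile (fun y => y == x)).length ≤ n := by
          have h1 : (xs.dropWhile (fun y => y == x)).length ≤ xs.length :=
            List.length_dropWhile_le _ _
          simp only [List.length_cons] at hl
          omega
        have heq : x :: xs
            = List.replicate ((xs.takeWhile (fun y => y == x)).length + 1) x
              ++ xs.dropWhile (fun y => y == x) := by
          rw [List.replicate_succ, List.cons_append]
          conv_rhs => rw [← ht, ← hxs]
        rw [heq]
        exact hstep x _ _ hhead (ih _ hr)
  intro l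
  exact key l.length l le_rfl

theorem not_mem_rest (x : Int) (m : Nat) (rest : List Int)
    (hp : (List.replicate (m+1) x ++ rest).Pairwise (· ≤ ·))
    (hhead : ∀ y ∈ rest.head?, y ≠ x) : x ∉ rest := by
  intro hmem
  obtain ⟨h1, h2, h3⟩ := List.pairwise_append.mp hp
  cases rest with
  | nil => simp at hmem
  | cons y t =>
    have hxy : x ≤ y := h3 x (by simp [List.mem_replicate]) y (by simp)
    have hyx : y ≠ x := hhead y rfl
    rcases List.mem_cons.mp hmem with h | h
    · exact hyx h.symm
    · have hy_le : y ≤ x := (List.pairwise_cons.mp h2).1 x h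
      exact hyx (by omega)

theorem crux : ∀ (l : List Int), l.Pairwise (· ≤ ·) →
    ((∃ v, pairAny l v = true ∧ tripAny l v = false) ↔ bres l = true) := by
  refine run_ind _ ?_ ?_
  · intro _
    constructor
    · intro ⟨v, hp, _⟩
      exact absurd hp (by simp [pairAny, adjPairs])
    · intro h
      exact absurd h (by simp [bres])
  · intro x m rest hhead ih hpw
    have hmrest : rest.Pairwise (· ≤ ·) := (List.pairwise_append.mp hpw).2.1
    have hx : x ∉ rest := not_mem_rest x m rest hpw hhead
    have ihr := ih hmrest
    rw [bres_block x m rest hhead]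
    constructor
    · intro ⟨v, hp, ht⟩
      rw [pairAny_block x v m rest hhead] at hp
      rw [tripAny_block x v m rest hhead hx] at ht
      rcases Bool.or_eq_true_iff.mp hp with h | h
      · -- v = x and m ≥ 1
        have hm1 : 1 ≤ m := by
          have := (Bool.and_eq_true_iff.mp h).1; simpa using this
        have hxv : x = v := by
          have := (Bool.and_eq_true_iff.mp h).2; simpa using this
        have hm2 : ¬ (2 ≤ m) := by
          intro hm2
          rw [hxv] at ht
          simp [hm2] at ht
        have : m = 1 := by omega
        subst this
        simp
      · -- the pair lies in rest
        have hbt : tripAny rest v = false := by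
          rcases Bool.or_eq_false_iff.mp ht with ⟨_, h2⟩
          exact h2
        have : bres rest = true := ihr.mp ⟨v, h, hbt⟩
        simp [this]
    · intro h
      rcases Bool.or_eq_true_iff.mp h with h | h
      · -- m = 1 : the block itself is the exact pair
        have hm : m = 1 := by
          have : (m : Int) + 1 = 2 := by simpa using h
          omega
        subst hm
        refine ⟨x, ?_, ?_⟩
        · rw [pairAny_block x x 1 rest hhead]
          simp
        · rw [tripAny_block x x 1 rest hhead hx]
          have : tripAny rest x = false := by
            cases htr : tripAny rest x
            · rfl
            · exact absurd (tripAny_mem rest x htr) hx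
          simp [this]
      · -- the exact pair lies in rest
        obtain ⟨v, hp, ht⟩ := ihr.mpr h
        have hvx : v ≠ x := fun he => hx (he ▸ pairAny_mem rest v hp)
        refine ⟨v, ?_, ?_⟩
        · rw [pairAny_block x v m rest hhead, hp]
          simp
        · rw [tripAny_block x v m rest hhead hx, ht]
          have : (x == v) = false := by
            rw [beq_eq_false_iff_ne]; exact Ne.symm hvx
          simp [this]

-- ===== VERDICT (by name: the statement is the Claim_ definition above) =====
theorem checkNumber2_spec : Claim_equal_checkNumber2 := by
  intro a _
  unfold Spec_checkNumber2
  rw [A_char, B_char]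
  cases hm : monoBool a with
  | false => simp
  | true =>
    have hpw := (mono_iff a).mp hm
    simp only [Bool.and_true, Bool.true_and]
    have h1 := adj_iff a
    have h2 := crux a hpw
    cases hA : adjBool a <;> cases hB : bres a <;> simp_all
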